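-- pv_equiv track=rewrite | github.com/Mark-Mekhail/Meta-Careers-Coding-Puzzle-Solutions | Level 2/Tunnel Time/python/Tunnel_time.py | getSecondsElapsed
-- ===== SOURCE A (Python) =====
-- from typing import List
--
-- def getSecondsElapsed(C: int, N: int, A: List[int], B: List[int], K: int) -> int:
--   circumferenceTunnelTime = 0
--   for i in range(N):
--     circumferenceTunnelTime += B[i] - A[i]
--
--
--   totalSeconds = (K // circumferenceTunnelTime) * C
--   remainingTime = K % circumferenceTunnelTime
--
--   # We can sort the list separately since tunnels do not overlap or cross position 0
--   A.sort()
--   B.sort()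
--   if remainingTime == 0:
--     return totalSeconds - C + B[-1]
--   else:
--     for i in range(N):
--       tunnelTime = B[i] - A[i]
--
--       remainingTime -= tunnelTime
--       if remainingTime <= 0:
--         # The train exceeds K seconds in the tunnel by -remainingTime seconds so we need to add the remaining time to the total time it takes to reach B[i]
--         return totalSeconds + B[i] + remainingTime
-- ===== SOURCE B (Python) =====
-- from typing import List
--
-- def getSecondsElapsed(C: int, N: int, A: List[int], B: List[int], K: int) -> int:
--   circumferenceTunnelTime = sum(B[:N]) - sum(A[:N])
--   totalSeconds = (K // circumferenceTunnelTime) * C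
--   remainingTime = K % circumferenceTunnelTime
--   A.sort()
--   B.sort()
--   if remainingTime == 0:
--     return totalSeconds - C + B[-1]
--   # cumulative exit-time table: cum[i] = time to clear tunnels 0..i
--   cum = []
--   s = 0
--   for a, b in zip(A[:N], B[:N]):
--     s += b - a
--     cum.append(s)
--   i = 0
--   while cum[i] < remainingTime:
--     i += 1
--   return totalSeconds + B[i] + (remainingTime - cum[i])
-- ===== Notes on version B (the rewrite author's own statement) =====
-- stated objective: alternative
-- what changed: B computes the circumference as a difference of prefix-slice sums and replaces A's in-loop decrementing early-return scan by building a cumulative exit-time table once and then locating the first tunnel whose cumulative time reaches the remaining time.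
-- outside the precondition, e.g. on getSecondsElapsed(0, 1, [9], [-37, 7, 1], -1): A returns None, B raises IndexError
import Mathlib
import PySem

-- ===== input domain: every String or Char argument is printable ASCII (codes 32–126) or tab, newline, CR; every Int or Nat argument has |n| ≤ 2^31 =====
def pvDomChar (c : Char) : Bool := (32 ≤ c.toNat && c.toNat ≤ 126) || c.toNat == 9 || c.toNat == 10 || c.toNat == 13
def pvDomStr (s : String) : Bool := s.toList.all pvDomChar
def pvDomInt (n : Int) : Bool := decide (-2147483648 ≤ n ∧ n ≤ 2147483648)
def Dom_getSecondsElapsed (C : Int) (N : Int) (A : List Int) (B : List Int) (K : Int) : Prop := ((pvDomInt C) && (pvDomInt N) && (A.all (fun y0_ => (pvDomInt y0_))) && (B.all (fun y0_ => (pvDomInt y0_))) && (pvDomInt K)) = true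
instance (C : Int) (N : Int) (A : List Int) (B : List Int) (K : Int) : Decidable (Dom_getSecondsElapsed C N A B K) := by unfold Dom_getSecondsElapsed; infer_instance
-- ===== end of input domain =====

-- B replaces A's in-loop decrementing early-return scan by a cumulative exit-time table scanned once
-- (alternative decomposition, no speed claim); both versions sort A and B in place — the theorems here
-- are about the RETURN value only (the in-place sorts are the same in both).

-- ===== PORT A =====
-- the 'for i in range(N): … return …' loop with early return (returns None when it falls through: excluded by Pre_, the 0 stands for no value)
def aLoop (As Bs : List Int) (total : Int) : List Int → Int → Int
  | [], _ => 0
  | i :: is, r =>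
      let t := (PySem.List.pyGet? Bs i).getD 0 - (PySem.List.pyGet? As i).getD 0
      if r - t ≤ 0 then total + (PySem.List.pyGet? Bs i).getD 0 + (r - t)
      else aLoop As Bs total is (r - t)

def getSecondsElapsed (C : Int) (N : Int) (A : List Int) (B : List Int) (K : Int) : Int :=
  let circ := (PySem.List.pyRange 0 N 1).foldl
      (fun s i => s + ((PySem.List.pyGet? B i).getD 0 - (PySem.List.pyGet? A i).getD 0)) 0
  let totalSeconds := PySem.Int.floordiv K circ * C
  let remainingTime := PySem.Int.mod K circ
  let As := PySem.List.sorted A id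
  let Bs := PySem.List.sorted B id
  if remainingTime = 0 then totalSeconds - C + (PySem.List.pyGet? Bs (-1)).getD 0
  else aLoop As Bs totalSeconds (PySem.List.pyRange 0 N 1) remainingTime

-- ===== PORT B =====
-- the 'while cum[i] < remainingTime: i += 1' scan (cum[i] raises IndexError when it runs off the end: excluded by Pre_)
def bFind : List Int → Int → Int → Int
  | [], _, i => i
  | c :: cs, r, i => if c < r then bFind cs r (i + 1) else i

def getSecondsElapsed_alt (C : Int) (N : Int) (A : List Int) (B : List Int) (K : Int) : Int :=
  let circ := (PySem.List.slice B none (some N)).sum - (PySem.List.slice A none (some N)).sum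
  let totalSeconds := PySem.Int.floordiv K circ * C
  let remainingTime := PySem.Int.mod K circ
  let As := PySem.List.sorted A id
  let Bs := PySem.List.sorted B id
  if remainingTime = 0 then totalSeconds - C + (PySem.List.pyGet? Bs (-1)).getD 0
  else
    let cum := (((PySem.List.slice As none (some N)).zip (PySem.List.slice Bs none (some N))).foldl
        (fun (p : Int × List Int) ab => (p.1 + (ab.2 - ab.1), p.2 ++ [p.1 + (ab.2 - ab.1)])) ((0 : Int), ([] : List Int))).2
    let i := bFind cum remainingTime 0
    totalSeconds + (PySem.List.pyGet? Bs i).getD 0 + (remainingTime - (PySem.List.pyGet? cum i).getD 0)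

-- ===== PRECONDITION & SPEC =====
-- Pre_ admits exactly the inputs on which the Python A returns an int: it excludes N ≤ 0 or a zero
-- circumference (ZeroDivisionError), N beyond a list's length (IndexError), and the inputs where A's
-- second loop falls through and A returns None — not a value of the declared int type (B raises there).
def Pre_getSecondsElapsed (C : Int) (N : Int) (A : List Int) (B : List Int) (K : Int) : Prop :=
  0 < N ∧ N ≤ (A.length : Int) ∧ N ≤ (B.length : Int) ∧
  (B.take N.toNat).sum - (A.take N.toNat).sum ≠ 0 ∧
  (PySem.Int.mod K ((B.take N.toNat).sum - (A.take N.toNat).sum) = 0 ∨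
   ∃ i < N.toNat,
     PySem.Int.mod K ((B.take N.toNat).sum - (A.take N.toNat).sum) ≤
       ((List.zipWith (fun b a => b - a) ((PySem.List.sorted B id).take N.toNat)
          ((PySem.List.sorted A id).take N.toNat)).take (i + 1)).sum)
instance (C : Int) (N : Int) (A : List Int) (B : List Int) (K : Int) : Decidable (Pre_getSecondsElapsed C N A B K) := by unfold Pre_getSecondsElapsed; infer_instance

def pvWitness_getSecondsElapsed : Int × Int × List Int × List Int × Int := (10, 2, [1, 5], [3, 7], 13)

def Spec_getSecondsElapsed (C : Int) (N : Int) (A : List Int) (B : List Int) (K : Int) (out : Int) : Prop := out = getSecondsElapsed_alt C N A B K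
instance (C : Int) (N : Int) (A : List Int) (B : List Int) (K : Int) (out : Int) : Decidable (Spec_getSecondsElapsed C N A B K out) := by unfold Spec_getSecondsElapsed; infer_instance

-- ===== CLAIM (what is proved, stated in full; the proofs are below) =====
def Claim_equal_getSecondsElapsed : Prop := ∀ (C : Int) (N : Int) (A : List Int) (B : List Int) (K : Int), Dom_getSecondsElapsed C N A B K → Pre_getSecondsElapsed C N A B K → Spec_getSecondsElapsed C N A B K (getSecondsElapsed C N A B K)

-- ===== LEMMAS AND PROOFS =====

-- steps-to-first-crossing and the remaining time there: the common skeleton of A's scan and B's table scan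
def cross : List Int → Int → Nat × Int
  | [], r => (0, r)
  | d :: tl, r => if r - d ≤ 0 then (0, r - d) else ((cross tl (r - d)).1 + 1, (cross tl (r - d)).2)

-- running prefix sums starting from pre (what B's fold appends)
def cumOf : List Int → Int → List Int
  | [], _ => []
  | d :: tl, pre => (pre + d) :: cumOf tl (pre + d)

theorem zip_map_sub (xs ys : List Int) :
    (xs.zip ys).map (fun ab => ab.2 - ab.1) = List.zipWith (fun b a => b - a) ys xs := by
  induction xs generalizing ys with
  | nil => cases ys <;> rfl
  | cons x xs ih => cases ys with
    | nil => rfl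
    | cons y ys => simp [List.zip_cons_cons, ih]

theorem foldcum (ps : List (Int × Int)) (s : Int) (acc : List Int) :
    (ps.foldl (fun (p : Int × List Int) ab => (p.1 + (ab.2 - ab.1), p.2 ++ [p.1 + (ab.2 - ab.1)])) (s, acc)).2
      = acc ++ cumOf (ps.map (fun ab => ab.2 - ab.1)) s := by
  induction ps generalizing s acc with
  | nil => simp [cumOf]
  | cons p ps ih => simp [List.foldl_cons, ih, cumOf]

theorem bFind_cumOf (ds : List Int) (pre a r : Int) :
    bFind (cumOf ds pre) r a = a + ((cross ds (r - pre)).1 : Int) := by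
  induction ds generalizing pre a r with
  | nil => simp [cumOf, bFind, cross]
  | cons d tl ih =>
    simp only [cumOf, bFind, cross]
    by_cases h : pre + d < r
    · rw [if_pos h, if_neg (by omega), ih]
      have : r - (pre + d) = r - pre - d := by ring
      rw [this]
      push_cast; ring
    · rw [if_neg h, if_pos (by omega)]
      simp

theorem cum_get_at_cross (ds : List Int) (pre r : Int) (h : (cross ds r).1 < ds.length) :
    (PySem.List.pyGet? (cumOf ds pre) ((cross ds r).1 : Int)).getD 0 = pre + (r - (cross ds r).2) := by
  induction ds generalizing pre r with
  | nil => simp [cross] at h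
  | cons d tl ih =>
    simp only [cross] at h ⊢
    by_cases hc : r - d ≤ 0
    · rw [if_pos hc]
      simp [cumOf]
    · rw [if_neg hc] at h ⊢
      simp only [cumOf]
      rw [show (((cross tl (r - d)).1 + 1 : Nat) : Int) = (((cross tl (r - d)).1 : Nat) : Int) + 1 by push_cast; ring]
      rw [PySem.List.pyGet?_cons_succ]
      rw [ih (pre + d) (r - d) (by simpa using h)]
      ring

theorem cross_lt_of_exists (ds : List Int) (r : Int)
    (h : ∃ i < ds.length, r ≤ (ds.take (i + 1)).sum) : (cross ds r).1 < ds.length := by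
  induction ds generalizing r with
  | nil => obtain ⟨i, hi, _⟩ := h; simp at hi
  | cons d tl ih =>
    simp only [cross]
    by_cases hc : r - d ≤ 0
    · rw [if_pos hc]; simp
    · rw [if_neg hc]
      obtain ⟨i, hi, hs⟩ := h
      cases i with
      | zero => simp at hs; omega
      | succ j =>
        have : ∃ i < tl.length, r - d ≤ (tl.take (i + 1)).sum := by
          refine ⟨j, by simpa using hi, ?_⟩
          simp [List.take_succ_cons] at hs
          omega
        have := ih (r - d) this
        simpa using Nat.succ_lt_succ this

theorem aLoop_cross (As Bs : List Int) (total : Int) (n : Nat)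
    (hA : n ≤ As.length) (hB : n ≤ Bs.length) :
    ∀ (m a : Nat) (r : Int), a + m = n →
      (cross ((List.zipWith (fun b a => b - a) (Bs.take n) (As.take n)).drop a) r).1
        < n - a →
      aLoop As Bs total (PySem.List.pyRange (a : Int) (n : Int) 1) r
        = total
          + (PySem.List.pyGet? Bs ((a + (cross ((List.zipWith (fun b a => b - a) (Bs.take n) (As.take n)).drop a) r).1 : Nat) : Int)).getD 0
          + (cross ((List.zipWith (fun b a => b - a) (Bs.take n) (As.take n)).drop a) r).2 := by
  intro m
  set ds := List.zipWith (fun b a => b - a) (Bs.take n) (As.take n) with hds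
  have hlen : ds.length = n := by
    simp [hds, List.length_zipWith]; omega
  induction m with
  | zero =>
    intro a r ha h
    omega
  | succ m ih =>
    intro a r ha h
    have han : a < n := by omega
    have haInt : (a : Int) < (n : Int) := by exact_mod_cast han
    rw [PySem.List.pyRange_one_cons haInt]
    have hdrop : ds.drop a = ds[a] :: ds.drop (a + 1) :=
      List.drop_eq_getElem_cons (by omega)
    have hgB : (PySem.List.pyGet? Bs (a : Int)).getD 0 = Bs[a]'(by omega) := by
      rw [PySem.List.pyGet?_natCast, List.getElem?_eq_getElem (by omega)]
      rfl
    have hgA : (PySem.List.pyGet? As (a : Int)).getD 0 = As[a]'(by omega) := by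
      rw [PySem.List.pyGet?_natCast, List.getElem?_eq_getElem (by omega)]
      rfl
    have hdsa : ds[a]'(by omega) = Bs[a]'(by omega) - As[a]'(by omega) := by
      simp [hds, List.getElem_zipWith, List.getElem_take]
    rw [hdrop] at h ⊢
    simp only [aLoop, cross, hgA, hgB, hdsa] at h ⊢
    by_cases hc : r - (Bs[a]'(by omega) - As[a]'(by omega)) ≤ 0
    · simp only [if_pos hc]
      simp [List.getElem?_eq_getElem (show a < Bs.length by omega)]
    · rw [if_neg hc] at h
      simp only [if_neg hc]
      have h' : (cross (ds.drop (a + 1)) (r - (Bs[a]'(by omega) - As[a]'(by omega)))).1 + 1 < n - a := h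
      have hstep : ((a : Int) + 1) = (((a + 1 : Nat)) : Int) := by push_cast; ring
      rw [hstep]
      rw [ih (a + 1) (r - (Bs[a]'(by omega) - As[a]'(by omega))) (by omega) (by omega)]
      have hidx : a + 1 + (cross (ds.drop (a + 1)) (r - (Bs[a]'(by omega) - As[a]'(by omega)))).1
          = a + ((cross (ds.drop (a + 1)) (r - (Bs[a]'(by omega) - As[a]'(by omega)))).1 + 1) := by omega
      rw [hidx]

theorem circA_eq (A B : List Int) (n : Nat) (hA : n ≤ A.length) (hB : n ≤ B.length) :
    (PySem.List.pyRange 0 (n : Int) 1).foldl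
        (fun s i => s + ((PySem.List.pyGet? B i).getD 0 - (PySem.List.pyGet? A i).getD 0)) 0
      = (B.take n).sum - (A.take n).sum := by
  rw [PySem.List.pyRange_zero_nat, List.foldl_map]
  induction n with
  | zero => simp
  | succ m ih =>
    have hm : m < A.length := by omega
    have hm' : m < B.length := by omega
    rw [List.range_succ, List.foldl_append]
    rw [ih (by omega) (by omega)]
    simp only [List.foldl_cons, List.foldl_nil, PySem.List.pyGet?_natCast,
      List.getElem?_eq_getElem hm, List.getElem?_eq_getElem hm', Option.getD_some,
      List.take_add_one, List.sum_append, Option.toList_some, List.sum_cons, List.sum_nil]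
    ring

-- ===== VERDICT (by name: the statement is the Claim_ definition above) =====
theorem getSecondsElapsed_spec : Claim_equal_getSecondsElapsed := by
  unfold Claim_equal_getSecondsElapsed Spec_getSecondsElapsed
  intro C N A B K hDom hPre
  obtain ⟨hN, hA, hB, hS, hrest⟩ := hPre
  have hNn : ((N.toNat : Nat) : Int) = N := Int.toNat_of_nonneg (le_of_lt hN)
  have hAsl : (PySem.List.sorted A id).length = A.length := PySem.List.length_sorted A id false
  have hBsl : (PySem.List.sorted B id).length = B.length := PySem.List.length_sorted B id false
  unfold getSecondsElapsed getSecondsElapsed_alt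
  dsimp only
  rw [← hNn]
  rw [circA_eq A B N.toNat (by omega) (by omega)]
  rw [PySem.List.slice_to (xs := B) (b := ((N.toNat : Nat) : Int)) (by positivity),
      PySem.List.slice_to (xs := A) (b := ((N.toNat : Nat) : Int)) (by positivity),
      PySem.List.slice_to (xs := PySem.List.sorted A id) (b := ((N.toNat : Nat) : Int)) (by positivity),
      PySem.List.slice_to (xs := PySem.List.sorted B id) (b := ((N.toNat : Nat) : Int)) (by positivity)]
  rw [Int.toNat_natCast]
  rw [foldcum, zip_map_sub]
  simp only [List.nil_append]
  split_ifs with hmod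
  · rfl
  · -- abbreviations
    set n := N.toNat with hn
    set As := PySem.List.sorted A id with hAs
    set Bs := PySem.List.sorted B id with hBs
    set S := (List.take n B).sum - (List.take n A).sum with hSdef
    set r := PySem.Int.mod K S with hr
    set ds := List.zipWith (fun b a => b - a) (List.take n Bs) (List.take n As) with hds
    have hdsl : ds.length = n := by
      simp [hds, List.length_zipWith]; omega
    have hex : ∃ i < ds.length, r ≤ (ds.take (i + 1)).sum := by
      rcases hrest with h0 | hex
      · exact absurd h0 hmod
      · obtain ⟨i, hi, hle⟩ := hex
        exact ⟨i, by omega, hle⟩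
    have hcross : (cross ds r).1 < ds.length := cross_lt_of_exists ds r hex
    have hAcall := aLoop_cross As Bs (PySem.Int.floordiv K S * C) n
        (by omega) (by omega) n 0 r (by omega)
    simp only [List.drop_zero, Nat.cast_zero, Nat.zero_add, ← hds] at hAcall
    rw [hAcall (by omega)]
    rw [bFind_cumOf ds 0 0 r]
    have hfix : (0 : Int) + (((cross ds (r - 0)).1 : Nat) : Int) = (((cross ds r).1 : Nat) : Int) := by
      simp
    rw [hfix]
    rw [cum_get_at_cross ds 0 r hcross]
    ring
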